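-- pv_equiv track=rewrite | github.com/GaMasterPro/Taxi-Project | Taxi Project/taxi_project.py | pricing
-- ===== SOURCE A (Python) =====
-- def pricing(taxi_class, minutes):
--
--     if minutes <= 0:
--         return "Invalid time"
--
--     pricing_structure = {
--         'Casual': [
--             (15, '15$'),
--             (30, '25$'),
--             (60, '40$'),
--             (float('inf'), '50$')
--         ],
--         'Business': [
--             (15, '20$'),
--             (30, '35$'),
--             (60, '50$'),
--             (float('inf'), '65$')
--         ],
--         'Business Plus': [
--             (15, '25$'),
--             (30, '45$'),
--             (60, '60$'),
--             (float('inf'), '80$')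
--         ],
--         'Fancy': [
--             (15, '30$'),
--             (30, '50$'),
--             (60, '75$'),
--             (float('inf'), '100$')
--         ]
--     }
--
--     if taxi_class not in pricing_structure:
--         return "Invalid taxi class"
--
--     for max_minutes, price in pricing_structure[taxi_class]:
--         if minutes <= max_minutes:
--             return price
--
--     return "Pricing not available"
-- ===== SOURCE B (Python) =====
-- def pricing(taxi_class, minutes):
--     if minutes <= 0:
--         return "Invalid time"
--     prices = {
--         'Casual': ('15$', '25$', '40$', '50$'),
--         'Business': ('20$', '35$', '50$', '65$'),
--         'Business Plus': ('25$', '45$', '60$', '80$'),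
--         'Fancy': ('30$', '50$', '75$', '100$'),
--     }
--     if taxi_class not in prices:
--         return "Invalid taxi class"
--     idx = (minutes > 15) + (minutes > 30) + (minutes > 60)
--     return prices[taxi_class][idx]
-- ===== Notes on version B (the rewrite author's own statement) =====
-- stated objective: simpler
-- what changed: Replaced the per-class threshold scan over (limit, price) pairs by one arithmetic tier index idx = (minutes>15)+(minutes>30)+(minutes>60) and a direct lookup into a class-to-price-tuple table, removing the loop and the float('inf') sentinel.
import Mathlib
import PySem

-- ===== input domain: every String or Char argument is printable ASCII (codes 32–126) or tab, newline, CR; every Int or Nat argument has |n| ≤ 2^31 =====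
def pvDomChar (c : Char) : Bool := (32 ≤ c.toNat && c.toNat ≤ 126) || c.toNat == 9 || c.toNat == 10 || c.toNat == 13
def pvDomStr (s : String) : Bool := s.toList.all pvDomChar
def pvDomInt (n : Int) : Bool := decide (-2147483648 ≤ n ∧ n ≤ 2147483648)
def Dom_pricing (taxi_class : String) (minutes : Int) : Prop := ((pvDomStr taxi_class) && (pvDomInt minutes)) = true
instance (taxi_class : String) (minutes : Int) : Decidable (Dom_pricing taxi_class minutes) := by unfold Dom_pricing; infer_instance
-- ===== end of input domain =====

-- B replaces A's per-class scan over (limit, price) pairs by an arithmetic tier index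
-- plus a direct table lookup (objective: simpler).

-- ===== PORT A =====
-- float('inf') in the threshold lists is modelled as `none` (the comparison `minutes <= inf`
-- is always true for finite minutes, exactly as `none ↦ true` below).
def pricingStructure : PySem.Dict String (List (Option Int × String)) :=
  PySem.Dict.ofList [
    ("Casual", [(some 15, "15$"), (some 30, "25$"), (some 60, "40$"), (none, "50$")]),
    ("Business", [(some 15, "20$"), (some 30, "35$"), (some 60, "50$"), (none, "65$")]),
    ("Business Plus", [(some 15, "25$"), (some 30, "45$"), (some 60, "60$"), (none, "80$")]),
    ("Fancy", [(some 15, "30$"), (some 30, "50$"), (some 60, "75$"), (none, "100$")])]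

def pricingLoop (minutes : Int) : List (Option Int × String) → String
  | [] => "Pricing not available"
  | (maxMinutes, price) :: rest =>
      if (match maxMinutes with | some t => decide (minutes ≤ t) | none => true) then price
      else pricingLoop minutes rest

def pricing (taxi_class : String) (minutes : Int) : String :=
  if minutes ≤ 0 then "Invalid time"
  else if ¬ pricingStructure.contains taxi_class then "Invalid taxi class"
  else pricingLoop minutes ((pricingStructure.get? taxi_class).getD [])

-- ===== PORT B =====
def altPrices : PySem.Dict String (List String) :=
  PySem.Dict.ofList [
    ("Casual", ["15$", "25$", "40$", "50$"]),
    ("Business", ["20$", "35$", "50$", "65$"]),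
    ("Business Plus", ["25$", "45$", "60$", "80$"]),
    ("Fancy", ["30$", "50$", "75$", "100$"])]

def pricing_alt (taxi_class : String) (minutes : Int) : String :=
  if minutes ≤ 0 then "Invalid time"
  else
    match altPrices.get? taxi_class with
    | none => "Invalid taxi class"
    | some ps =>
        let idx : Int := (if 15 < minutes then 1 else 0) + (if 30 < minutes then 1 else 0)
          + (if 60 < minutes then 1 else 0)
        -- idx ∈ {0,1,2,3} and ps has 4 entries, so the pyGet? never misses; getD "" is unreachable
        (PySem.List.pyGet? ps idx).getD ""

-- ===== PRECONDITION & SPEC =====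
def Spec_pricing (taxi_class : String) (minutes : Int) (out : String) : Prop := out = pricing_alt taxi_class minutes
instance (taxi_class : String) (minutes : Int) (out : String) : Decidable (Spec_pricing taxi_class minutes out) := by unfold Spec_pricing; infer_instance

-- ===== CLAIM (what is proved, stated in full; the proofs are below) =====
def Claim_equal_pricing : Prop := ∀ (taxi_class : String) (minutes : Int), Dom_pricing taxi_class minutes → Spec_pricing taxi_class minutes (pricing taxi_class minutes)

-- ===== LEMMAS AND PROOFS =====

theorem pricingLoop_eq_pyGet (m : Int) (p1 p2 p3 p4 : String) :
    pricingLoop m [(some 15, p1), (some 30, p2), (some 60, p3), (none, p4)] =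
      (PySem.List.pyGet? [p1, p2, p3, p4]
        ((if (15:Int) < m then 1 else 0) + (if (30:Int) < m then 1 else 0)
          + (if (60:Int) < m then 1 else 0))).getD "" := by
  by_cases h1 : m ≤ 15
  · rw [if_neg (by omega), if_neg (by omega), if_neg (by omega)]
    simp [pricingLoop, h1, PySem.List.pyGet?, PySem.List.pyIdx?]
  · by_cases h2 : m ≤ 30
    · rw [if_pos (by omega), if_neg (by omega), if_neg (by omega)]
      simp [pricingLoop, h1, h2, PySem.List.pyGet?, PySem.List.pyIdx?]
    · by_cases h3 : m ≤ 60
      · rw [if_pos (by omega), if_pos (by omega), if_neg (by omega)]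
        simp [pricingLoop, h1, h2, h3, PySem.List.pyGet?, PySem.List.pyIdx?]
      · rw [if_pos (by omega), if_pos (by omega), if_pos (by omega)]
        simp [pricingLoop, h1, h2, h3, PySem.List.pyGet?, PySem.List.pyIdx?]

-- ===== VERDICT (by name: the statement is the Claim_ definition above) =====
theorem pricing_spec : Claim_equal_pricing := by
  intro tc m _
  unfold Spec_pricing pricing pricing_alt
  by_cases hm : m ≤ 0
  · simp [hm]
  · by_cases h1 : tc = "Casual"
    · subst h1
      rw [if_neg hm,
        if_neg (show ¬¬pricingStructure.contains "Casual" = true from by decide),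
        show (pricingStructure.get? "Casual").getD [] = [(some 15, "15$"), (some 30, "25$"), (some 60, "40$"), (none, "50$")] from by decide,
        show altPrices.get? "Casual" = some ["15$", "25$", "40$", "50$"] from by decide]
      simp only [if_neg hm]
      exact pricingLoop_eq_pyGet m _ _ _ _
    · by_cases h2 : tc = "Business"
      · subst h2
        rw [if_neg hm,
          if_neg (show ¬¬pricingStructure.contains "Business" = true from by decide),
          show (pricingStructure.get? "Business").getD [] = [(some 15, "20$"), (some 30, "35$"), (some 60, "50$"), (none, "65$")] from by decide,
          show altPrices.get? "Business" = some ["20$", "35$", "50$", "65$"] from by decide]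
        simp only [if_neg hm]
        exact pricingLoop_eq_pyGet m _ _ _ _
      · by_cases h3 : tc = "Business Plus"
        · subst h3
          rw [if_neg hm,
            if_neg (show ¬¬pricingStructure.contains "Business Plus" = true from by decide),
            show (pricingStructure.get? "Business Plus").getD [] = [(some 15, "25$"), (some 30, "45$"), (some 60, "60$"), (none, "80$")] from by decide,
            show altPrices.get? "Business Plus" = some ["25$", "45$", "60$", "80$"] from by decide]
          simp only [if_neg hm]
          exact pricingLoop_eq_pyGet m _ _ _ _
        · by_cases h4 : tc = "Fancy"
          · subst h4
            rw [if_neg hm,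
              if_neg (show ¬¬pricingStructure.contains "Fancy" = true from by decide),
              show (pricingStructure.get? "Fancy").getD [] = [(some 15, "30$"), (some 30, "50$"), (some 60, "75$"), (none, "100$")] from by decide,
              show altPrices.get? "Fancy" = some ["30$", "50$", "75$", "100$"] from by decide]
            simp only [if_neg hm]
            exact pricingLoop_eq_pyGet m _ _ _ _
          · have h1' : ("Casual":String) ≠ tc := fun h => h1 h.symm
            have h2' : ("Business":String) ≠ tc := fun h => h2 h.symm
            have h3' : ("Business Plus":String) ≠ tc := fun h => h3 h.symm
            have h4' : ("Fancy":String) ≠ tc := fun h => h4 h.symm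
            rw [show pricingStructure = PySem.Dict.mk
                  [("Casual", [(some 15, "15$"), (some 30, "25$"), (some 60, "40$"), (none, "50$")]),
                   ("Business", [(some 15, "20$"), (some 30, "35$"), (some 60, "50$"), (none, "65$")]),
                   ("Business Plus", [(some 15, "25$"), (some 30, "45$"), (some 60, "60$"), (none, "80$")]),
                   ("Fancy", [(some 15, "30$"), (some 30, "50$"), (some 60, "75$"), (none, "100$")])] from by decide,
                show altPrices = PySem.Dict.mk
                  [("Casual", ["15$", "25$", "40$", "50$"]), ("Business", ["20$", "35$", "50$", "65$"]),
                   ("Business Plus", ["25$", "45$", "60$", "80$"]), ("Fancy", ["30$", "50$", "75$", "100$"])] from by decide]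
            simp [hm, PySem.Dict.contains_mk, PySem.Dict.get?, h1', h2', h3', h4']
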